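-- pv_equiv track=rewrite | github.com/QuangPhung15/CompetitiveProgramming | codeforce/Python/800/Vanya and Cubes.py | solve
-- ===== SOURCE A (Python) =====
-- def solve(n):
-- 	res = 0
-- 	curr = 1
--
-- 	while (curr <= n):
-- 		res += 1
-- 		n -= curr
-- 		curr += res + 1
--
-- 	return res
-- ===== SOURCE B (Python) =====
-- def solve(n):
--     # largest k with tetrahedral number k(k+1)(k+2)/6 <= n, by integer binary search
--     if n < 1:
--         return 0
--     lo, hi = 0, n + 1
--     while lo + 1 < hi:
--         mid = (lo + hi) // 2
--         if mid * (mid + 1) * (mid + 2) <= 6 * n: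
--             lo = mid
--         else:
--             hi = mid
--     return lo
-- ===== Notes on version B (the rewrite author's own statement) =====
-- stated objective: alternative
-- what changed: Replaced the level-by-level subtraction loop with an integer binary search for the largest k with k(k+1)(k+2) <= 6n (tetrahedral threshold); logarithmically many iterations vs cube-root many, though both are sub-millisecond on the task domain.
import Mathlib
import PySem

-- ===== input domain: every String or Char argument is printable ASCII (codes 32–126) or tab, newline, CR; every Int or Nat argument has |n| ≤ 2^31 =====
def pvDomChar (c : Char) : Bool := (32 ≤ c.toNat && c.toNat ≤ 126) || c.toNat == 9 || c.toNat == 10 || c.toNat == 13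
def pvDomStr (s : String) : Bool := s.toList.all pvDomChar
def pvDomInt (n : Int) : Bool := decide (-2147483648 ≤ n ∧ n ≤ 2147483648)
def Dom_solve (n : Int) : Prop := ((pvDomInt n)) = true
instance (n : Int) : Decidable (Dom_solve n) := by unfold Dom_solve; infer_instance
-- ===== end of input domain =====

-- B replaces A's level-by-level subtraction loop with an integer binary search
-- for the largest k with k(k+1)(k+2) <= 6n; return value only, no side effects.

-- ===== PORT A =====
-- while (curr <= n): res += 1; n -= curr; curr += res + 1
-- (fuel = n.toNat + 1 is a totality guard only: n drops by curr ≥ 1 each pass, so it never runs out)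
def solveLoop (fuel : Nat) (res curr n : Int) : Int :=
  match fuel with
  | 0 => res
  | f + 1 =>
    if curr ≤ n then solveLoop f (res + 1) (curr + (res + 1) + 1) (n - curr)
    else res

def solve (n : Int) : Int := solveLoop (n.toNat + 1) 0 1 n

-- ===== PORT B =====
-- while lo + 1 < hi: mid = (lo+hi)//2; if mid(mid+1)(mid+2) <= 6n: lo = mid else hi = mid
-- (fuel = (hi-lo).toNat is a totality guard only: the gap shrinks every pass)
def bsearchLoop (fuel : Nat) (lo hi n : Int) : Int :=
  match fuel with
  | 0 => lo
  | f + 1 =>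
    if lo + 1 < hi then
      let mid := PySem.Int.floordiv (lo + hi) 2
      if mid * (mid + 1) * (mid + 2) ≤ 6 * n then bsearchLoop f mid hi n
      else bsearchLoop f lo mid n
    else lo

def solve_alt (n : Int) : Int :=
  if n < 1 then 0
  else bsearchLoop (n + 1).toNat 0 (n + 1) n

-- ===== PRECONDITION & SPEC =====
def Spec_solve (n : Int) (out : Int) : Prop := out = solve_alt n
instance (n : Int) (out : Int) : Decidable (Spec_solve n out) := by unfold Spec_solve; infer_instance

-- ===== CLAIM (what is proved, stated in full; the proofs are below) =====
def Claim_equal_solve : Prop := ∀ (n : Int), Dom_solve n → Spec_solve n (solve n)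

-- ===== LEMMAS AND PROOFS =====

-- monotonicity of k ↦ k(k+1)(k+2) on k ≥ 0
lemma cube_mono (r s : Int) (h0 : 0 ≤ r) (h : r ≤ s) :
    r * (r + 1) * (r + 2) ≤ s * (s + 1) * (s + 2) := by
  nlinarith [sq_nonneg (r + s), sq_nonneg (r - s), sq_nonneg s]

-- uniqueness of the tetrahedral threshold
lemma threshold_unique (M r s : Int) (hr0 : 0 ≤ r) (hs0 : 0 ≤ s)
    (hr1 : r * (r + 1) * (r + 2) ≤ M) (hr2 : M < (r + 1) * (r + 2) * (r + 3))
    (hs1 : s * (s + 1) * (s + 2) ≤ M) (hs2 : M < (s + 1) * (s + 2) * (s + 3)) :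
    r = s := by
  rcases lt_trichotomy r s with h | h | h
  · exfalso
    have := cube_mono (r + 1) s (by omega) (by omega)
    nlinarith
  · exact h
  · exfalso
    have := cube_mono (s + 1) r (by omega) (by omega)
    nlinarith

-- A's loop computes the tetrahedral threshold of M = 6·n₀ (invariant: 6n + res(res+1)(res+2) = M)
lemma solveLoop_spec (f : Nat) : ∀ (res curr n M : Int),
    n < (f : Int) → 0 ≤ res → 1 ≤ curr →
    2 * curr = (res + 1) * (res + 2) →
    res * (res + 1) * (res + 2) ≤ M →
    6 * n + res * (res + 1) * (res + 2) = M →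
    0 ≤ solveLoop f res curr n ∧
    (solveLoop f res curr n) * (solveLoop f res curr n + 1) * (solveLoop f res curr n + 2) ≤ M ∧
    M < (solveLoop f res curr n + 1) * (solveLoop f res curr n + 2) * (solveLoop f res curr n + 3) := by
  induction f with
  | zero =>
    intro res curr n M hf hres hcurr htri hlow hinv
    simp only [solveLoop]
    refine ⟨hres, hlow, ?_⟩
    have hneg : n < 0 := by exact_mod_cast hf
    nlinarith
  | succ f ih =>
    intro res curr n M hf hres hcurr htri hlow hinv
    simp only [solveLoop]
    split_ifs with h
    · apply ih
      · push_cast at hf ⊢; omega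
      · omega
      · nlinarith
      · linear_combination htri
      · nlinarith
      · linear_combination hinv - 3 * htri
    · refine ⟨hres, hlow, ?_⟩
      have hlt : n < curr := by omega
      nlinarith

-- B's binary search keeps lo(lo+1)(lo+2) ≤ 6n < hi(hi+1)(hi+2) and closes the gap
lemma bsearchLoop_spec (f : Nat) : ∀ (lo hi n : Int),
    hi - lo ≤ (f : Int) → 0 ≤ lo → lo < hi →
    lo * (lo + 1) * (lo + 2) ≤ 6 * n → 6 * n < hi * (hi + 1) * (hi + 2) →
    0 ≤ bsearchLoop f lo hi n ∧
    (bsearchLoop f lo hi n) * (bsearchLoop f lo hi n + 1) * (bsearchLoop f lo hi n + 2) ≤ 6 * n ∧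
    6 * n < (bsearchLoop f lo hi n + 1) * (bsearchLoop f lo hi n + 2) * (bsearchLoop f lo hi n + 3) := by
  induction f with
  | zero =>
    intro lo hi n hf h0 hlt hl hh
    exfalso
    have : (0:Int) = ((0:Nat) : Int) := rfl
    omega
  | succ f ih =>
    intro lo hi n hf h0 hlt hl hh
    simp only [bsearchLoop]
    split_ifs with h1 h2
    · have hm : PySem.Int.floordiv (lo + hi) 2 = (lo + hi) / 2 :=
        PySem.Int.floordiv_eq_ediv_of_pos (by omega)
      rw [hm] at h2 ⊢
      have hb : lo < (lo + hi) / 2 ∧ (lo + hi) / 2 < hi := by omega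
      apply ih
      · push_cast at hf ⊢; omega
      · omega
      · exact hb.2
      · exact h2
      · exact hh
    · have hm : PySem.Int.floordiv (lo + hi) 2 = (lo + hi) / 2 :=
        PySem.Int.floordiv_eq_ediv_of_pos (by omega)
      rw [hm] at h2 ⊢
      have hb : lo < (lo + hi) / 2 ∧ (lo + hi) / 2 < hi := by omega
      apply ih
      · push_cast at hf ⊢; omega
      · exact h0
      · exact hb.1
      · exact hl
      · exact not_le.mp h2
    · have : hi = lo + 1 := by omega
      subst this
      exact ⟨h0, hl, by nlinarith⟩

-- ===== VERDICT (by name: the statement is the Claim_ definition above) =====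
theorem solve_spec : Claim_equal_solve := by
  intro n _
  unfold Spec_solve solve solve_alt
  by_cases hn : n < 1
  · have h0 : n.toNat = 0 ∨ n.toNat = 1 := by omega
    rcases h0 with h | h <;> simp [h, solveLoop] <;> omega
  · rw [if_neg hn]
    have hn : 1 ≤ n := not_lt.mp hn
    have hA := solveLoop_spec (n.toNat + 1) 0 1 n (6 * n)
      (by push_cast; omega) (by omega) (by omega) (by ring) (by omega) (by ring)
    have hcube : (0:Int) ≤ n * n * n :=
      mul_nonneg (mul_nonneg (by omega) (by omega)) (by omega)
    have hB := bsearchLoop_spec (n + 1).toNat 0 (n + 1) n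
      (by omega) (by omega) (by omega) (by omega)
      (by nlinarith [sq_nonneg n, hcube])
    exact threshold_unique (6 * n) _ _ hA.1 hB.1 hA.2.1 hA.2.2 hB.2.1 hB.2.2
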